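-- pv_equiv track=rewrite | github.com/FEZZDINO/Leetcode | nowcoder/bytedance_2019_spring/4.py | xx
-- ===== SOURCE A (Python) =====
-- def xx(word, strs):
--     word = [i for i in word]
--     strs = [i for i in strs]
--     for i in word:
--         if i in strs:
--             strs.remove(i)
--
--     if strs == []:
--         return True
--
--     return False
-- ===== SOURCE B (Python) =====
-- def xx(word, strs):
--     # True iff no character occurs more often in strs than in word:
--     # compare per-character counts over the distinct chars of strs.
--     need = {}
--     for c in strs:
--         need[c] = need.get(c, 0) + 1
--     have = {}
--     for c in word:
--         have[c] = have.get(c, 0) + 1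
--     return all(have.get(c, 0) >= n for c, n in need.items())
-- ===== Notes on version B (the rewrite author's own statement) =====
-- stated objective: faster
-- what changed: Replaced the word-loop with conditional list.remove (each an O(m) scan) by building two frequency tables once and comparing them: True iff no char's count in strs exceeds its count in word.
import Mathlib
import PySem

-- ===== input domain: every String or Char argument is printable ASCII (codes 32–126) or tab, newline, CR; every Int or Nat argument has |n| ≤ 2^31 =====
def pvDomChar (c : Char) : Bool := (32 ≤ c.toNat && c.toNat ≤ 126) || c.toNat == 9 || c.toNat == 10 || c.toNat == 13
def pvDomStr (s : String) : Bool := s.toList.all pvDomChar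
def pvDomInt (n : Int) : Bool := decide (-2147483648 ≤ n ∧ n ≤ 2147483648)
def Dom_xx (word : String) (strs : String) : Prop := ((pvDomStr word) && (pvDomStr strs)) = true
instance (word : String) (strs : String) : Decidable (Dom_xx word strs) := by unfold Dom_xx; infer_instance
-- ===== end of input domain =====

-- B replaces A's word-loop with conditional list.remove by two frequency tables compared once (faster, O(n+m) vs O(n*m)).

-- ===== PORT A =====
-- for i in word: if i in strs: strs.remove(i);  then strs == []
def xx (word : String) (strs : String) : Bool :=
  let w := word.toList
  let s := strs.toList
  let s' := w.foldl (fun acc i => if acc.contains i then (PySem.List.remove? acc i).getD acc else acc) s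
  decide (s' = [])

-- ===== PORT B =====
-- need = counts of strs; have = counts of word; all(have.get(c,0) >= n for c,n in need.items())
def xx_alt (word : String) (strs : String) : Bool :=
  let need := strs.toList.foldl (fun d c => d.insert c (d.getD c 0 + 1)) (PySem.Dict.empty : PySem.Dict Char Int)
  let hav := word.toList.foldl (fun d c => d.insert c (d.getD c 0 + 1)) (PySem.Dict.empty : PySem.Dict Char Int)
  need.items.all (fun p => hav.getD p.1 0 ≥ p.2)

-- ===== PRECONDITION & SPEC =====
def Spec_xx (word : String) (strs : String) (out : Bool) : Prop := out = xx_alt word strs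
instance (word : String) (strs : String) (out : Bool) : Decidable (Spec_xx word strs out) := by unfold Spec_xx; infer_instance

-- ===== CLAIM (what is proved, stated in full; the proofs are below) =====
def Claim_equal_xx : Prop := ∀ (word : String) (strs : String), Dom_xx word strs → Spec_xx word strs (xx word strs)

-- ===== LEMMAS AND PROOFS =====

-- one word-loop step: count of any char after conditional remove
theorem pv_count_step (acc : List Char) (i c : Char) :
    (if acc.contains i then (PySem.List.remove? acc i).getD acc else acc).count c
      = acc.count c - (if c = i then acc.count c ⊓ 1 else 0) := by
  by_cases h : i ∈ acc
  · simp only [List.contains_eq_mem, h, decide_true, if_true,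
      PySem.List.remove?_eq_some_erase _ _ h, Option.getD_some]
    by_cases hc : c = i
    · subst hc
      have hpos : 0 < acc.count c := List.count_pos_iff.mpr h
      simp [List.count_erase_self]; omega
    · simp [List.count_erase_of_ne hc, hc]
  · simp only [List.contains_eq_mem, h, decide_false]
    by_cases hc : c = i
    · subst hc
      have : acc.count c = 0 := by
        simpa using (List.count_eq_zero.mpr h)
      simp [this]
    · simp [hc]

-- count invariant of the whole fold: truncated subtraction of counts
theorem pv_count_fold (w : List Char) :
    ∀ (s : List Char) (c : Char),
    (w.foldl (fun acc i => if acc.contains i then (PySem.List.remove? acc i).getD acc else acc) s).count c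
      = s.count c - w.count c := by
  induction w with
  | nil => intro s c; simp
  | cons i w ih =>
    intro s c
    simp only [List.foldl_cons]
    rw [ih]
    rw [pv_count_step]
    by_cases hc : c = i
    · subst hc; simp [List.count_cons]; omega
    · have hic : i ≠ c := fun h => hc h.symm
      simp [hc, hic]

theorem pv_fold_empty_iff (w s : List Char) :
    (w.foldl (fun acc i => if acc.contains i then (PySem.List.remove? acc i).getD acc else acc) s) = []
      ↔ ∀ c, s.count c ≤ w.count c := by
  constructor
  · intro h c
    have := pv_count_fold w s c
    rw [h] at this
    simp at this
    omega
  · intro h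
    rw [List.eq_nil_iff_forall_not_mem]
    intro c hc
    have hpos := List.count_pos_iff.mpr hc
    rw [pv_count_fold w s c] at hpos
    have := h c
    omega

theorem xx_eq (word strs : String) : xx word strs = xx_alt word strs := by
  unfold xx xx_alt
  simp only [PySem.Dict.foldl_insert_getD_add_one_eq_counter, PySem.Dict.items_counter,
    List.all_map]
  rw [Bool.eq_iff_iff]
  simp only [decide_eq_true_eq, List.all_eq_true, Function.comp,
    PySem.Dict.getD_counter, ge_iff_le]
  rw [pv_fold_empty_iff]
  constructor
  · intro h c _
    exact_mod_cast h c
  · intro h c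
    by_cases hm : c ∈ strs.toList
    · exact_mod_cast h c ((PySem.Set.mem_ofList strs.toList c).mpr hm)
    · simp [List.count_eq_zero.mpr hm]

-- ===== VERDICT (by name: the statement is the Claim_ definition above) =====
theorem xx_spec : Claim_equal_xx := by
  intro word strs _
  unfold Spec_xx
  exact xx_eq word strs
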